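-- pv_equiv track=rewrite | github.com/hckang-dev/error_collector | aruco_refiner/refine_core.py | output_fields
-- ===== SOURCE A (Python) =====
-- CAMERA_COLUMNS = ("pCAMx", "pCAMy", "pCAMz", "qCAMx", "qCAMy", "qCAMz", "qCAMw")
--
-- def diagnostic_columns(marker_id: int) -> list[str]:
--     return [
--         f"valid{marker_id}",
--         f"quality{marker_id}",
--         f"reason{marker_id}",
--         f"angle_jump{marker_id}",
--         f"pos_step{marker_id}",
--     ]
--
-- def output_fields(input_fields: list[str], marker_ids: tuple[int, ...]) -> list[str]:
--     fields: list[str] = []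
--     seen: set[str] = set()
--     for field in input_fields:
--         if field in seen:
--             continue
--         fields.append(field)
--         seen.add(field)
--         if field == "t":
--             for camera_field in CAMERA_COLUMNS:
--                 if camera_field not in seen:
--                     fields.append(camera_field)
--                     seen.add(camera_field)
--     if "t" not in seen:
--         raise RuntimeError("input CSV does not contain a 't' column")
--     for marker_id in marker_ids:
--         for field in diagnostic_columns(marker_id):
--             if field not in seen:
--                 fields.append(field)
--                 seen.add(field)
--     return fields
-- ===== SOURCE B (Python) =====
-- CAMERA_COLUMNS = ("pCAMx", "pCAMy", "pCAMz", "qCAMx", "qCAMy", "qCAMz", "qCAMw")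
--
-- def diagnostic_columns(marker_id: int) -> list[str]:
--     return [
--         f"valid{marker_id}",
--         f"quality{marker_id}",
--         f"reason{marker_id}",
--         f"angle_jump{marker_id}",
--         f"pos_step{marker_id}",
--     ]
--
-- def output_fields(input_fields: list[str], marker_ids: tuple[int, ...]) -> list[str]:
--     if "t" not in input_fields:
--         raise RuntimeError("input CSV does not contain a 't' column")
--     # stage 1: build the full (possibly duplicated) column stream
--     stream: list[str] = []
--     for field in input_fields:
--         stream.append(field)
--         if field == "t":
--             stream.extend(CAMERA_COLUMNS)
--     for marker_id in marker_ids: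
--         stream.extend(diagnostic_columns(marker_id))
--     # stage 2: keep each entry only at the position of its first occurrence
--     return [x for i, x in enumerate(stream) if stream.index(x) == i]
-- ===== Notes on version B (the rewrite author's own statement) =====
-- stated objective: alternative
-- what changed: A's single interleaved loop with a seen-set is replaced by a staged build-then-dedup design: first the whole duplicated column stream (input fields, camera columns after 't', then all diagnostics) is materialised, then duplicates are removed positionally by keeping an entry only where stream.index(x) equals its position, with no seen-set at all.
import Mathlib
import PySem

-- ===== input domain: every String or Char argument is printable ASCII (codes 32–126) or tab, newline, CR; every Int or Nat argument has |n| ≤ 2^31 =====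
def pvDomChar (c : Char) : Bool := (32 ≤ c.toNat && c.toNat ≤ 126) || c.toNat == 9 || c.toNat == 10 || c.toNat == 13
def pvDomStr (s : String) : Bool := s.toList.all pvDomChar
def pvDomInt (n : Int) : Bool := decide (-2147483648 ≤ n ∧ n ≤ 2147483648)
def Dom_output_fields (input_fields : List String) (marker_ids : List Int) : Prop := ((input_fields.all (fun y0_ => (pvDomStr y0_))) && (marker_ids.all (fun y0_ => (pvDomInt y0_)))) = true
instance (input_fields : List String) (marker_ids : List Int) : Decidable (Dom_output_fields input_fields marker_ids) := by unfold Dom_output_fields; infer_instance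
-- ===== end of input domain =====

-- B replaces A's interleaved seen-set loop by a staged design: build the full duplicated stream, then drop every entry whose position is not its first occurrence (alternative algorithm, no seen-set; quadratic dedup).


-- shared module-level data (CAMERA_COLUMNS and diagnostic_columns from the Python module, used by both A and B)
def pvCameraColumns : List String := ["pCAMx", "pCAMy", "pCAMz", "qCAMx", "qCAMy", "qCAMz", "qCAMw"]

def pvDiagnosticColumns (marker_id : Int) : List String :=
  ["valid" ++ PySem.Int.toStr marker_id,
   "quality" ++ PySem.Int.toStr marker_id,
   "reason" ++ PySem.Int.toStr marker_id,
   "angle_jump" ++ PySem.Int.toStr marker_id,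
   "pos_step" ++ PySem.Int.toStr marker_id]

-- ===== PORT A =====
-- the repeated Python pattern "if field not in seen: fields.append(field); seen.add(field)"
def pvAppendUnseen (st : List String × PySem.Set String) (field : String) : List String × PySem.Set String :=
  if field ∈ st.2 then st else (st.1 ++ [field], PySem.Set.add st.2 field)

def output_fields (input_fields : List String) (marker_ids : List Int) : List String :=
  let st := input_fields.foldl (fun st field =>
      if field ∈ st.2 then st
      else
        let st' := (st.1 ++ [field], PySem.Set.add st.2 field)
        if field = "t" then pvCameraColumns.foldl pvAppendUnseen st' else st')
    (([], []) : List String × PySem.Set String)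
  if "t" ∈ st.2 then
    (marker_ids.foldl (fun st m => (pvDiagnosticColumns m).foldl pvAppendUnseen st) st).1
  else []  -- Python raises RuntimeError here; excluded by Pre_

-- ===== PORT B =====
def output_fields_alt (input_fields : List String) (marker_ids : List Int) : List String :=
  if "t" ∈ input_fields then
    -- stage 1: build the full (possibly duplicated) column stream
    let stream := marker_ids.foldl (fun acc m => acc ++ pvDiagnosticColumns m)
      (input_fields.foldl (fun acc field =>
        let acc := acc ++ [field]
        if field = "t" then acc ++ pvCameraColumns else acc) [])
    -- stage 2: keep each entry only at the position of its first occurrence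
    ((PySem.List.enumerate stream 0).filter
      (fun p => (PySem.List.index? stream p.2).map (fun k => (k : Int)) == some p.1)).map (·.2)
  else []  -- Python raises RuntimeError here; excluded by Pre_

-- ===== PRECONDITION & SPEC =====
-- Pre_ excludes inputs with no "t" column, on which the Python A (and B) raise RuntimeError.
def Pre_output_fields (input_fields : List String) (marker_ids : List Int) : Prop :=
  "t" ∈ input_fields
instance (input_fields : List String) (marker_ids : List Int) : Decidable (Pre_output_fields input_fields marker_ids) := by unfold Pre_output_fields; infer_instance

def pvWitness_output_fields : List String × List Int := (["t", "x"], [1])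

def Spec_output_fields (input_fields : List String) (marker_ids : List Int) (out : List String) : Prop := out = output_fields_alt input_fields marker_ids
instance (input_fields : List String) (marker_ids : List Int) (out : List String) : Decidable (Spec_output_fields input_fields marker_ids out) := by unfold Spec_output_fields; infer_instance

-- ===== CLAIM (what is proved, stated in full; the proofs are below) =====
def Claim_equal_output_fields : Prop := ∀ (input_fields : List String) (marker_ids : List Int), Dom_output_fields input_fields marker_ids → Pre_output_fields input_fields marker_ids → Spec_output_fields input_fields marker_ids (output_fields input_fields marker_ids)

-- ===== LEMMAS AND PROOFS =====

-- A fold of pvAppendUnseen starting from a pair with equal components is Set.update on both components.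
theorem pv_foldl_appendUnseen (l : List String) (s : List String) :
    l.foldl pvAppendUnseen (s, s) = (PySem.Set.update s l, PySem.Set.update s l) := by
  induction l generalizing s with
  | nil => simp [PySem.Set.update_nil]
  | cons c t ih =>
      have hstep : pvAppendUnseen (s, s) c = (PySem.Set.add s c, PySem.Set.add s c) := by
        by_cases h : c ∈ s <;>
          simp [pvAppendUnseen, h, PySem.Set.add_of_mem, PySem.Set.add_of_not_mem]
      simp only [List.foldl_cons, hstep, ih (PySem.Set.add s c), PySem.Set.update_cons]

-- A's diagnostics loop computes Set.update along the flattened diagnostic columns (both components).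
theorem pv_phase2 (ms : List Int) (s : List String) :
    ms.foldl (fun st m => (pvDiagnosticColumns m).foldl pvAppendUnseen st) (s, s)
      = (PySem.Set.update s (ms.flatMap pvDiagnosticColumns),
         PySem.Set.update s (ms.flatMap pvDiagnosticColumns)) := by
  induction ms generalizing s with
  | nil => simp [PySem.Set.update_nil]
  | cons m t ih =>
      simp only [List.foldl_cons]
      rw [pv_foldl_appendUnseen, ih, List.flatMap_cons, PySem.Set.update_append]

-- Updating with already-present elements is the identity.
theorem pv_update_of_subset (s : PySem.Set String) (xs : List String) (h : ∀ x ∈ xs, x ∈ s) :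
    PySem.Set.update s xs = s := by
  rw [PySem.Set.update_eq_append_filter]
  have hf : List.filter (fun y => !(PySem.Set.contains s y)) (PySem.Set.ofList xs) = [] := by
    rw [List.filter_eq_nil_iff]
    intro y hy
    have hys : y ∈ s := h y ((PySem.Set.mem_ofList xs y).mp hy)
    simpa using hys
  rw [hf, List.append_nil]

-- the per-field contribution of the stream
def pvG (f : String) : List String := if f = "t" then f :: pvCameraColumns else [f]

-- invariant of A's first loop: once "t" is seen, every camera column is seen
def pvInv (s : PySem.Set String) : Prop := "t" ∈ s → ∀ c ∈ pvCameraColumns, c ∈ s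

-- A's first loop computes Set.update along the flattened stream (on both components), keeping pvInv.
theorem pv_phase1 (l : List String) (s : List String) (hinv : pvInv s) :
    l.foldl (fun st field =>
        if field ∈ st.2 then st
        else
          let st' := (st.1 ++ [field], PySem.Set.add st.2 field)
          if field = "t" then pvCameraColumns.foldl pvAppendUnseen st' else st') (s, s)
      = (PySem.Set.update s (l.flatMap pvG), PySem.Set.update s (l.flatMap pvG))
      ∧ pvInv (PySem.Set.update s (l.flatMap pvG)) := by
  induction l generalizing s with
  | nil => exact ⟨by simp [PySem.Set.update_nil], by simpa [PySem.Set.update_nil] using hinv⟩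
  | cons f t ih =>
      have hstep : (if f ∈ s then (s, s)
          else
            let st' := ((s : List String) ++ [f], PySem.Set.add s f)
            if f = "t" then pvCameraColumns.foldl pvAppendUnseen st' else st')
          = (PySem.Set.update s (pvG f), PySem.Set.update s (pvG f)) := by
        by_cases hf : f ∈ s
        · by_cases ht : f = "t"
          · subst ht
            have hc : ∀ c ∈ pvCameraColumns, c ∈ s := hinv hf
            simp [hf, pvG, PySem.Set.update_cons,
              pv_update_of_subset s pvCameraColumns hc]
          · simp [hf, pvG, ht, PySem.Set.update_cons, PySem.Set.update_nil]
        · have hpair : ((s : List String) ++ [f], PySem.Set.add s f)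
              = ((PySem.Set.add s f : List String), PySem.Set.add s f) := by
            simp [PySem.Set.add_of_not_mem hf]
          by_cases ht : f = "t"
          · subst ht
            simp only [hf, if_false, hpair]
            rw [pv_foldl_appendUnseen]
            simp [pvG, PySem.Set.update_cons]
          · simp [hf, ht, pvG, PySem.Set.update_cons, PySem.Set.update_nil]
      have hinv' : pvInv (PySem.Set.update s (pvG f)) := by
        intro hts c hc
        by_cases ht : f = "t"
        · subst ht
          exact (PySem.Set.mem_update _ _ _).mpr (Or.inr (by simp [pvG, hc]))
        · have hts' : "t" ∈ s := by
            rcases (PySem.Set.mem_update _ _ _).mp hts with h | h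
            · exact h
            · simp [pvG, ht] at h
              exact absurd h.symm ht
          exact (PySem.Set.mem_update _ _ _).mpr (Or.inl (hinv hts' c hc))
      have ih' := ih (PySem.Set.update s (pvG f)) hinv'
      constructor
      · simp only [List.foldl_cons]
        rw [hstep, ih'.1]
        simp [PySem.Set.update_append]
      · have := ih'.2
        simpa [PySem.Set.update_append] using this

-- B's stage-1 field loop builds exactly the flatMap of pvG.
theorem pv_stage1_eq_flatMap (l : List String) :
    l.foldl (fun acc field =>
        let acc := acc ++ [field]
        if field = "t" then acc ++ pvCameraColumns else acc) []
      = l.flatMap pvG := by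
  have h : ∀ acc : List String, l.foldl (fun acc field =>
      let acc := acc ++ [field]
      if field = "t" then acc ++ pvCameraColumns else acc) acc
      = l.foldl (fun acc field => acc ++ pvG field) acc := by
    intro acc
    apply PySem.List.foldl_congr_mem
    intro a x _
    by_cases ht : x = "t" <;> simp [pvG, ht]
  rw [h, PySem.List.foldl_append_eq_flatMap]
  simp

-- Positional first-occurrence filtering of any list is its ordered dedup.
theorem pv_firstOcc (l : List String) :
    ((PySem.List.enumerate l 0).filter
        (fun p => (PySem.List.index? l p.2).map (fun k => (k : Int)) == some p.1)).map (·.2)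
      = PySem.Set.ofList l := by
  induction l using List.reverseRecOn with
  | nil => simp [PySem.List.enumerate_nil]
  | append_singleton xs x ih =>
      rw [PySem.List.enumerate_append, List.filter_append, List.map_append]
      have hcongr :
          (PySem.List.enumerate xs 0).filter
              (fun p => (PySem.List.index? (xs ++ [x]) p.2).map (fun k => (k : Int)) == some p.1)
            = (PySem.List.enumerate xs 0).filter
              (fun p => (PySem.List.index? xs p.2).map (fun k => (k : Int)) == some p.1) := by
        apply List.filter_congr
        intro p hp
        obtain ⟨k, hk, hpk⟩ := (PySem.List.mem_enumerate_iff _ _ _).mp hp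
        have hmem : p.2 ∈ xs := by subst hpk; exact List.getElem_mem hk
        rw [PySem.List.index?_append_of_mem _ hmem]
      rw [hcongr, ih]
      by_cases hx : x ∈ xs
      · have hidx : PySem.List.index? (xs ++ [x]) x = PySem.List.index? xs x :=
          PySem.List.index?_append_of_mem _ hx
        obtain ⟨k, hk⟩ := Option.isSome_iff_exists.mp ((PySem.List.index?_isSome_iff xs x).mpr hx)
        obtain ⟨hklt, -, -⟩ := PySem.List.getElem_of_index?_eq_some hk
        have hlast : ((PySem.List.enumerate [x] ((0 : Int) + xs.length)).filter
            (fun p => (PySem.List.index? (xs ++ [x]) p.2).map (fun k => (k : Int)) == some p.1)).map (·.2) = [] := by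
          simp only [PySem.List.enumerate_cons, PySem.List.enumerate_nil, List.filter_cons,
            List.filter_nil, hidx, hk]
          simp
          omega
        rw [hlast, List.append_nil, PySem.Set.ofList_append_singleton,
          PySem.Set.add_of_mem (by exact (PySem.Set.mem_ofList xs x).mpr hx)]
      · have hidx : PySem.List.index? (xs ++ [x]) x = some xs.length :=
          PySem.List.index?_append_singleton_self xs x hx
        have hlast : ((PySem.List.enumerate [x] ((0 : Int) + xs.length)).filter
            (fun p => (PySem.List.index? (xs ++ [x]) p.2).map (fun k => (k : Int)) == some p.1)).map (·.2) = [x] := by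
          simp only [PySem.List.enumerate_cons, PySem.List.enumerate_nil, List.filter_cons,
            List.filter_nil, hidx]
          simp
        rw [hlast, PySem.Set.ofList_append_singleton,
          PySem.Set.add_of_not_mem (fun h => hx ((PySem.Set.mem_ofList xs x).mp h))]

-- "t" is in the stream iff it is among the input fields (it is not a camera column).
theorem pv_t_mem_flatMap (l : List String) : "t" ∈ l.flatMap pvG ↔ "t" ∈ l := by
  rw [List.mem_flatMap]
  constructor
  · rintro ⟨f, hf, hmem⟩
    by_cases ht : f = "t"
    · exact ht ▸ hf
    · exfalso
      rw [pvG, if_neg ht] at hmem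
      simp at hmem
      exact ht hmem.symm
  · intro h; exact ⟨"t", h, by simp [pvG]⟩

-- ===== VERDICT (by name: the statement is the Claim_ definition above) =====
theorem output_fields_spec : Claim_equal_output_fields := by
  intro input_fields marker_ids _ hpre
  unfold Spec_output_fields output_fields output_fields_alt
  have hinv0 : pvInv ([] : PySem.Set String) := by intro h; simp at h
  have h1 := (pv_phase1 input_fields [] hinv0).1
  rw [h1]
  dsimp only
  rw [pv_stage1_eq_flatMap]
  have htA : "t" ∈ PySem.Set.update ([] : PySem.Set String) (input_fields.flatMap pvG) := by
    rw [PySem.Set.update_nil_left]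
    exact (PySem.Set.mem_ofList _ _).mpr ((pv_t_mem_flatMap _).mpr hpre)
  have hpre' : "t" ∈ input_fields := hpre
  rw [if_pos htA, if_pos hpre', pv_phase2]
  dsimp only
  rw [pv_firstOcc, PySem.List.foldl_append_eq_flatMap, PySem.Set.ofList_append, PySem.Set.update_nil_left]
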